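-- pv_equiv track=rewrite | github.com/banditypte/leet-code | zigzag.py | get_skips
-- ===== SOURCE A (Python) =====
-- def get_skips(num_rows):
--     if num_rows == 1:
--         return [1]
--     a = []
--     for i in range(num_rows):
--         a.append(0)
--
--     x = int((num_rows - 1) / 2)
--     y = x if x == (num_rows - 1) / 2 else x + 1
--
--     skips = int(num_rows / 2) * 2
--
--     while x >= 0 and y < len(a):
--         a[x] = skips
--         a[y] = skips
--         x -= 1
--         y += 1
--         skips += 2
--
--     return a
-- ===== SOURCE B (Python) =====
-- def get_skips(num_rows):
--     if num_rows == 1: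
--         return [1]
--     base = (num_rows // 2) * 2
--     return [base + (abs(2 * i - (num_rows - 1)) // 2) * 2 for i in range(num_rows)]
-- ===== Notes on version B (the rewrite author's own statement) =====
-- stated objective: simpler
-- what changed: The center-outward two-pointer while-loop mutating a preallocated zero list is replaced by a direct per-index closed form: each row's skip is base + 2*floor(|2i-(n-1)|/2) with base = (n//2)*2, computed in one comprehension.
import Mathlib
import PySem

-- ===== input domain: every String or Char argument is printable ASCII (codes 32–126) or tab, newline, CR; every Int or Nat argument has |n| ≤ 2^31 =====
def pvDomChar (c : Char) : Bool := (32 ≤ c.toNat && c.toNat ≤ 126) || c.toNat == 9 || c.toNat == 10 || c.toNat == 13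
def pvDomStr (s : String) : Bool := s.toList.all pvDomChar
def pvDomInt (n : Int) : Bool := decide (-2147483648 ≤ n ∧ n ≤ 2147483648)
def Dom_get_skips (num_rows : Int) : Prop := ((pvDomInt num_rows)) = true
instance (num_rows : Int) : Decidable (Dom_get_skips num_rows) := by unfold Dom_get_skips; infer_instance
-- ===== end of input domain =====

-- B replaces A's center-outward two-pointer mutation loop by a per-index closed form (objective: simpler).

-- ===== PORT A =====
-- the while loop: a[x] = a[y] = skips; x -= 1; y += 1; skips += 2 while x >= 0 and y < len(a).
-- In every call made by A the assigned indices satisfy 0 ≤ x ≤ y < len a, so Python's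
-- a[x] = skips is exactly List.set x.toNat.
def loopA (a : List Int) (x y skips : Int) : List Int :=
  if h : 0 ≤ x ∧ y < (a.length : Int) then
    loopA ((a.set x.toNat skips).set y.toNat skips) (x - 1) (y + 1) (skips + 2)
  else a
termination_by (x + 1).toNat
decreasing_by omega

def get_skips (num_rows : Int) : List Int :=
  if num_rows == 1 then [1]
  else
    -- a = [0]*num_rows built by the for-append loop;
    -- x = int((num_rows-1)/2): on Dom the float division by 2 is exact and int() truncates toward 0, = Int.tdiv;
    -- y = x if x == (num_rows-1)/2 else x+1, i.e. x exactly when num_rows-1 is even;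
    -- skips = int(num_rows/2)*2, exact on Dom as above
    loopA ((PySem.List.pyRange 0 num_rows 1).map (fun _ => 0))
      ((num_rows - 1).tdiv 2)
      (if (num_rows - 1) % 2 == 0 then (num_rows - 1).tdiv 2 else (num_rows - 1).tdiv 2 + 1)
      (num_rows.tdiv 2 * 2)

-- ===== PORT B =====
def get_skips_alt (num_rows : Int) : List Int :=
  if num_rows == 1 then [1]
  else
    -- base = (num_rows // 2) * 2, inlined into the comprehension
    (PySem.List.pyRange 0 num_rows 1).map
      (fun i => PySem.Int.floordiv num_rows 2 * 2 + PySem.Int.floordiv |2 * i - (num_rows - 1)| 2 * 2)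

-- ===== PRECONDITION & SPEC =====
def Spec_get_skips (num_rows : Int) (out : List Int) : Prop := out = get_skips_alt num_rows
instance (num_rows : Int) (out : List Int) : Decidable (Spec_get_skips num_rows out) := by unfold Spec_get_skips; infer_instance

-- ===== CLAIM (what is proved, stated in full; the proofs are below) =====
def Claim_equal_get_skips : Prop := ∀ (num_rows : Int), Dom_get_skips num_rows → Spec_get_skips num_rows (get_skips num_rows)

-- ===== LEMMAS AND PROOFS =====

theorem loopA_length (a : List Int) (x y skips : Int) :
    (loopA a x y skips).length = a.length := by
  induction a, x, y, skips using loopA.induct with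
  | case1 a x y skips h ih =>
    rw [loopA, dif_pos h]
    simpa using ih
  | case2 a x y skips h =>
    rw [loopA, dif_neg h]

-- the loop invariant: pointers x/y stay symmetric around the center (x + y = n - 1) and the
-- running skips value is the closed form evaluated at either pointer
theorem loopA_get (n : Int) :
    ∀ (a : List Int) (x y skips : Int),
      (a.length : Int) = n → x + y = n - 1 → x ≤ y →
      skips = n.tdiv 2 * 2 + (y - x).tdiv 2 * 2 →
      ∀ i : Nat, (i : Int) < n →
        (loopA a x y skips)[i]? =
          if (i : Int) ≤ x ∨ y ≤ (i : Int) then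
            some (n.tdiv 2 * 2 + (|2 * (i : Int) - (n - 1)|).tdiv 2 * 2)
          else a[i]? := by
  intro a x y skips
  induction a, x, y, skips using loopA.induct with
  | case1 a x y skips h ih =>
    intro hlen hxy hxle hsk i hi
    rw [loopA, dif_pos h]
    have hylen : y < (a.length : Int) := h.2
    have hx0 : 0 ≤ x := h.1
    have hlen' : (((a.set x.toNat skips).set y.toNat skips).length : Int) = n := by
      simpa using hlen
    have hsk' : skips + 2 = n.tdiv 2 * 2 + (y + 1 - (x - 1)).tdiv 2 * 2 := by
      have h2 : (y + 1 - (x - 1)).tdiv 2 = (y - x).tdiv 2 + 1 := by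
        rw [Int.tdiv_eq_ediv_of_nonneg (by omega), Int.tdiv_eq_ediv_of_nonneg (by omega)]
        omega
      rw [h2]; omega
    have hrec := ih hlen' (by omega) (by omega) hsk' i hi
    rw [hrec]
    by_cases hc1 : (i : Int) ≤ x - 1 ∨ y + 1 ≤ (i : Int)
    · rw [if_pos hc1, if_pos (hc1.imp (by omega) (by omega))]
    · rw [if_neg hc1]
      by_cases hcover : (i : Int) = x ∨ (i : Int) = y
      · rw [if_pos (hcover.imp (fun h => le_of_eq h) (fun h => ge_of_eq h))]
        have ha' : ((a.set x.toNat skips).set y.toNat skips)[i]? = some skips := by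
          rw [List.getElem?_set, List.getElem?_set]
          simp only [List.length_set]
          rcases hcover with hc | hc <;> split_ifs <;> first | rfl | omega
        rw [ha']
        have habs : |2 * (i : Int) - (n - 1)| = y - x := by
          rcases hcover with hc | hc
          · rw [abs_of_nonpos (by omega)]; omega
          · rw [abs_of_nonneg (by omega)]; omega
        rw [habs]; exact congrArg some hsk
      · rw [if_neg (by push_neg at hc1 hcover ⊢; omega)]
        rw [List.getElem?_set_ne (by push_neg at hcover; omega),
            List.getElem?_set_ne (by push_neg at hcover; omega)]
  | case2 a x y skips h =>
    intro hlen hxy hxle hsk i hi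
    rw [loopA, dif_neg h]
    rw [if_neg (by push_neg at h ⊢; constructor <;> omega)]

-- ===== VERDICT (by name: the statement is the Claim_ definition above) =====
theorem get_skips_spec : Claim_equal_get_skips := by
  intro n _
  unfold Spec_get_skips get_skips get_skips_alt
  by_cases h1 : n = 1
  · simp [h1]
  rw [if_neg (show ¬((n == 1) = true) from by simpa using h1),
      if_neg (show ¬((n == 1) = true) from by simpa using h1)]
  by_cases hle : n ≤ 0
  · have hr : PySem.List.pyRange 0 n 1 = [] := by
      rw [PySem.List.pyRange_one]
      have : (n - 0).toNat = 0 := by omega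
      rw [this]; rfl
    rw [hr]
    simp only [List.map_nil]
    rw [loopA, dif_neg (by
      simp only [List.length_nil, Nat.cast_zero]
      split_ifs <;> omega)]
  -- main case: 2 ≤ n
  have hn2 : 2 ≤ n := by omega
  obtain ⟨m, hm⟩ : ∃ m : Nat, n = (m : Int) := ⟨n.toNat, by omega⟩
  subst hm
  set x0 : Int := ((m : Int) - 1).tdiv 2 with hx0def
  set y0 : Int := if (((m : Int) - 1) % 2 == 0) then x0 else x0 + 1 with hy0def
  have hy0e : x0 + y0 = (m : Int) - 1 ∧ x0 ≤ y0 ∧ y0 ≤ x0 + 1 := by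
    have hx0e : x0 = ((m : Int) - 1) / 2 := by
      rw [hx0def, Int.tdiv_eq_ediv_of_nonneg (by omega)]
    rw [hy0def]
    by_cases hp : ((m : Int) - 1) % 2 = 0
    · rw [if_pos (by simpa using hp)]; omega
    · rw [if_neg (by simpa using hp)]; omega
  have hskinv : ((m : Int)).tdiv 2 * 2 = ((m : Int)).tdiv 2 * 2 + (y0 - x0).tdiv 2 * 2 := by
    have e0 : Int.tdiv 0 2 = 0 := by decide
    have e1 : Int.tdiv 1 2 = 0 := by decide
    have : y0 - x0 = 0 ∨ y0 - x0 = 1 := by omega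
    rcases this with h | h
    · rw [h, e0]; omega
    · rw [h, e1]; omega
  have hlen' : ((((PySem.List.pyRange 0 (m : Int) 1).map (fun _ => (0:Int))).length : Nat) : Int) = (m : Int) := by
    simp [PySem.List.length_pyRange_one]
  have key := loopA_get (m : Int) _ x0 y0 (((m : Int)).tdiv 2 * 2) hlen' hy0e.1 hy0e.2.1 hskinv
  apply List.ext_getElem?
  intro i
  by_cases hi : (i : Int) < (m : Int)
  · rw [key i hi, if_pos (by omega)]
    rw [PySem.List.getElem?_map_pyRange_zero _ m i (by exact_mod_cast hi)]
    have e2 : ∀ z : Int, 0 ≤ z → PySem.Int.floordiv z 2 = z.tdiv 2 := fun z hz => by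
      rw [PySem.Int.floordiv_eq_ediv_of_pos (by omega), Int.tdiv_eq_ediv_of_nonneg hz]
    rw [e2 (m : Int) (by omega), e2 _ (abs_nonneg _)]
  · rw [List.getElem?_eq_none, List.getElem?_eq_none]
    · simp only [List.length_map, PySem.List.length_pyRange_one]; omega
    · rw [loopA_length]
      simp only [List.length_map, PySem.List.length_pyRange_one]; omega
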